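-- pv_equiv track=rewrite | github.com/MustafaKorukmez/okey-game-simulation | okey_game_simulation.py | _is_double_run
-- ===== SOURCE A (Python) =====
-- from collections import defaultdict
-- from typing import List, Tuple, Dict, Optional
--
-- FAKE_OKEY_INDEX: int = 52
--
-- FAKE_OKEY_FACE_INDEX: int = 0
--
-- def _is_double_run(hand: List[int], okey: int, indicator: int) -> bool:
--     """Check whether ``hand`` forms a double run of seven pairs."""
--     counts: Dict[int, int] = defaultdict(int)
--     jokers = 0
--     for t in hand:
--         if t == FAKE_OKEY_INDEX:
--             if indicator == FAKE_OKEY_FACE_INDEX: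
--                 jokers += 1
--             else:
--                 counts[FAKE_OKEY_FACE_INDEX] += 1
--         elif t == okey:
--             jokers += 1
--         else:
--             counts[t] += 1
--
--     pairs = 0
--     singles = []
--     for c in counts.values():
--         pairs += c // 2
--         if c % 2:
--             singles.append(1)
--
--     if len(singles) > jokers:
--         return False
--     pairs += len(singles)
--     jokers -= len(singles)
--     pairs += jokers // 2
--
--     return pairs == 7 and pairs * 2 == len(hand)
-- ===== SOURCE B (Python) =====
-- FAKE_OKEY_INDEX: int = 52
-- FAKE_OKEY_FACE_INDEX: int = 0
--
-- def _toggle(odd, v):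
--     """Flip membership of v in the parity set."""
--     if v in odd:
--         odd.discard(v)
--     else:
--         odd.add(v)
--
-- def _is_double_run(hand, okey, indicator):
--     """Seven-pairs check via count parities: keep only the SET of tile values
--     seen an odd number of times; the hand is a double run iff it has 14 tiles,
--     the jokers can cover every odd value, and the joker remainder is even."""
--     odd = set()
--     jokers = 0
--     for t in hand:
--         if t == FAKE_OKEY_INDEX:
--             if indicator == FAKE_OKEY_FACE_INDEX:
--                 jokers += 1
--             else:
--                 _toggle(odd, FAKE_OKEY_FACE_INDEX)
--         elif t == okey:
--             jokers += 1
--         else: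
--             _toggle(odd, t)
--     s = len(odd)
--     return len(hand) == 14 and s <= jokers and (jokers - s) % 2 == 0
-- ===== Notes on version B (the rewrite author's own statement) =====
-- stated objective: simpler
-- what changed: Instead of counting copies per tile and then accumulating base pairs, promoting singles with jokers and pairing leftover jokers, B only maintains the set of tile values seen an odd number of times (parity toggling) and returns directly len(hand)==14 and |odd|<=jokers and (jokers-|odd|) even.
import Mathlib
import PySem

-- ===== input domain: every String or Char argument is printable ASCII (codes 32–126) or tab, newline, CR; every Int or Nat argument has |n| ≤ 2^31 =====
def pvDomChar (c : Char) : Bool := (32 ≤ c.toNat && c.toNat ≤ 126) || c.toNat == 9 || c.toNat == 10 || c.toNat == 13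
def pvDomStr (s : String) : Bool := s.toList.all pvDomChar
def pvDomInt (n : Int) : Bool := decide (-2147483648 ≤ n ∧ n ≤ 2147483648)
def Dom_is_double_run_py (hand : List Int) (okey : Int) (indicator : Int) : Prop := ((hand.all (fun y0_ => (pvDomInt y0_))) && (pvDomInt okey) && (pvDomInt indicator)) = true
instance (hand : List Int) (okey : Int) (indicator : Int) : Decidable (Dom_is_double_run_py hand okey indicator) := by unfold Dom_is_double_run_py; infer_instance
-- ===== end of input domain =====

-- B replaces A's per-tile count dict plus the pair/single/joker accumulation by a
-- parity set and a closed-form test on its size (objective: a simpler decomposition).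


-- B replaces A's count dict + pair/single/joker accumulation by a parity set and a
-- closed-form test (simpler decomposition; same return value everywhere).

-- ===== PORT A =====
-- first loop of A: builds the counts defaultdict and the joker count
def pvStepA (okey : Int) (indicator : Int) (st : PySem.Dict Int Int × Int) (t : Int) :
    PySem.Dict Int Int × Int :=
  if t = 52 then
    if indicator = 0 then (st.1, st.2 + 1)
    else (st.1.modify 0 0 (· + 1), st.2)
  else if t = okey then (st.1, st.2 + 1)
  else (st.1.modify t 0 (· + 1), st.2)

def is_double_run_py (hand : List Int) (okey : Int) (indicator : Int) : Bool :=
  let st := hand.foldl (pvStepA okey indicator) (PySem.Dict.empty, 0)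
  let counts := st.1
  let jokers := st.2
  let ps := counts.values.foldl
    (fun (ps : Int × List Int) c =>
      (ps.1 + PySem.Int.floordiv c 2,
       if PySem.Int.mod c 2 ≠ 0 then ps.2 ++ [1] else ps.2)) (0, [])
  let pairs := ps.1
  let singles := ps.2
  if ((singles.length : Int)) > jokers then false
  else
    let pairs := pairs + (singles.length : Int)
    let jokers := jokers - (singles.length : Int)
    let pairs := pairs + PySem.Int.floordiv jokers 2
    pairs == 7 && pairs * 2 == (hand.length : Int)

-- ===== PORT B =====
-- _toggle: flip membership of v in the parity set
def pvToggle (s : PySem.Set Int) (v : Int) : PySem.Set Int :=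
  if PySem.Set.contains s v then PySem.Set.discard s v else PySem.Set.add s v

-- first loop of B: parity set and joker count
def pvStepB (okey : Int) (indicator : Int) (st : PySem.Set Int × Int) (t : Int) :
    PySem.Set Int × Int :=
  if t = 52 then
    if indicator = 0 then (st.1, st.2 + 1)
    else (pvToggle st.1 0, st.2)
  else if t = okey then (st.1, st.2 + 1)
  else (pvToggle st.1 t, st.2)

def is_double_run_py_alt (hand : List Int) (okey : Int) (indicator : Int) : Bool :=
  let st := hand.foldl (pvStepB okey indicator) (PySem.Set.empty, 0)
  let s : Int := st.1.length
  decide (hand.length = 14) && decide (s ≤ st.2) && (PySem.Int.mod (st.2 - s) 2 == 0)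

-- ===== PRECONDITION & SPEC =====
def Spec_is_double_run_py (hand : List Int) (okey : Int) (indicator : Int) (out : Bool) : Prop := out = is_double_run_py_alt hand okey indicator
instance (hand : List Int) (okey : Int) (indicator : Int) (out : Bool) : Decidable (Spec_is_double_run_py hand okey indicator out) := by unfold Spec_is_double_run_py; infer_instance

-- ===== CLAIM (what is proved, stated in full; the proofs are below) =====
def Claim_equal_is_double_run_py : Prop := ∀ (hand : List Int) (okey : Int) (indicator : Int), Dom_is_double_run_py hand okey indicator → Spec_is_double_run_py hand okey indicator (is_double_run_py hand okey indicator)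

-- ===== LEMMAS AND PROOFS =====

def pvNorm (okey : Int) (indicator : Int) (t : Int) : Option Int :=
  if t = 52 then (if indicator = 0 then none else some 0)
  else if t = okey then none else some t

theorem pvFoldA (okey indicator : Int) (l : List Int) (d : PySem.Dict Int Int) (j : Int) :
    l.foldl (pvStepA okey indicator) (d, j) =
      ((l.filterMap (pvNorm okey indicator)).foldl (fun d x => d.modify x 0 (· + 1)) d,
       j + (l.countP (fun t => (pvNorm okey indicator t).isNone) : Int)) := by
  induction l generalizing d j with
  | nil => simp
  | cons t rest ih =>
    rw [List.foldl_cons, List.filterMap_cons, List.countP_cons]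
    rcases hn : pvNorm okey indicator t with _ | v
    · have h1 : pvStepA okey indicator (d, j) t = (d, j + 1) := by
        unfold pvStepA; unfold pvNorm at hn; split_ifs at hn ⊢ <;> simp_all
      rw [h1, ih]
      simp only [Option.isNone_none, Prod.mk.injEq]
      refine ⟨trivial, by push_cast; ring⟩
    · have h1 : pvStepA okey indicator (d, j) t = (d.modify v 0 (· + 1), j) := by
        unfold pvStepA; unfold pvNorm at hn; split_ifs at hn ⊢ <;> simp_all
      rw [h1, ih]
      simp only [Option.isNone_some, List.foldl_cons, Prod.mk.injEq]
      refine ⟨trivial, by simp⟩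

theorem pvFoldB (okey indicator : Int) (l : List Int) (S : PySem.Set Int) (j : Int) :
    l.foldl (pvStepB okey indicator) (S, j) =
      ((l.filterMap (pvNorm okey indicator)).foldl pvToggle S,
       j + (l.countP (fun t => (pvNorm okey indicator t).isNone) : Int)) := by
  induction l generalizing S j with
  | nil => simp
  | cons t rest ih =>
    rw [List.foldl_cons, List.filterMap_cons, List.countP_cons]
    rcases hn : pvNorm okey indicator t with _ | v
    · have h1 : pvStepB okey indicator (S, j) t = (S, j + 1) := by
        unfold pvStepB; unfold pvNorm at hn; split_ifs at hn ⊢ <;> simp_all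
      rw [h1, ih]
      simp only [Option.isNone_none, Prod.mk.injEq]
      refine ⟨trivial, by push_cast; ring⟩
    · have h1 : pvStepB okey indicator (S, j) t = (pvToggle S v, j) := by
        unfold pvStepB; unfold pvNorm at hn; split_ifs at hn ⊢ <;> simp_all
      rw [h1, ih]
      simp only [Option.isNone_some, List.foldl_cons, Prod.mk.injEq]
      refine ⟨trivial, by simp⟩

theorem pvToggleFold (l : List Int) (S : PySem.Set Int) (hS : S.Nodup) :
    (l.foldl pvToggle S).Nodup ∧
      ∀ x, x ∈ l.foldl pvToggle S ↔
        ((x ∈ S ∧ l.count x % 2 = 0) ∨ (x ∉ S ∧ l.count x % 2 = 1)) := by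
  induction l generalizing S with
  | nil => simp [hS]
  | cons t rest ih =>
    have hS' : (pvToggle S t).Nodup := by
      unfold pvToggle
      split_ifs with h
      · exact PySem.Set.nodup_discard _ _ hS
      · exact PySem.Set.nodup_add _ _ hS
    obtain ⟨hn, hm⟩ := ih (pvToggle S t) hS'
    refine ⟨hn, fun x => ?_⟩
    rw [List.foldl_cons, hm x]
    have htog : x ∈ pvToggle S t ↔ ((x ∈ S ∧ x ≠ t) ∨ (x ∉ S ∧ x = t)) := by
      by_cases h : t ∈ S
      · rw [pvToggle, if_pos ((PySem.Set.contains_iff S t).mpr h), PySem.Set.mem_discard]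
        constructor
        · rintro ⟨a, b⟩; exact Or.inl ⟨a, b⟩
        · rintro (⟨a, b⟩ | ⟨a, b⟩)
          · exact ⟨a, b⟩
          · exact absurd (b ▸ h) a
      · have hc : ¬ (PySem.Set.contains S t = true) := fun hc => h ((PySem.Set.contains_iff S t).mp hc)
        rw [pvToggle, if_neg hc, PySem.Set.mem_add]
        constructor
        · rintro (a | b)
          · exact Or.inl ⟨a, fun hxt => h (hxt ▸ a)⟩
          · exact Or.inr ⟨fun hx => h (b ▸ hx), b⟩
        · rintro (⟨a, _⟩ | ⟨_, b⟩)
          · exact Or.inl a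
          · exact Or.inr b
    rw [htog]
    by_cases hxt : x = t
    · subst hxt
      rw [List.count_cons_self]
      constructor
      · rintro (⟨(⟨_, b⟩ | ⟨a, _⟩), c⟩ | ⟨d, e⟩)
        · exact absurd rfl b
        · exact Or.inr ⟨a, by omega⟩
        · have hxS : x ∈ S := by
            by_contra hxS
            exact d (Or.inr ⟨hxS, rfl⟩)
          exact Or.inl ⟨hxS, by omega⟩
      · rintro (⟨a, b⟩ | ⟨a, b⟩)
        · exact Or.inr ⟨fun hd => by rcases hd with ⟨_, h2⟩ | ⟨h1, _⟩; exact h2 rfl; exact h1 a, by omega⟩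
        · exact Or.inl ⟨Or.inr ⟨a, rfl⟩, by omega⟩
    · rw [List.count_cons_of_ne (fun h => hxt h.symm)]
      constructor
      · rintro (⟨(⟨a, _⟩ | ⟨_, b⟩), c⟩ | ⟨d, e⟩)
        · exact Or.inl ⟨a, c⟩
        · exact absurd b hxt
        · exact Or.inr ⟨fun hx => d (Or.inl ⟨hx, hxt⟩), e⟩
      · rintro (⟨a, b⟩ | ⟨a, b⟩)
        · exact Or.inl ⟨Or.inl ⟨a, hxt⟩, b⟩
        · refine Or.inr ⟨?_, b⟩
          rintro (⟨c, _⟩ | ⟨_, c⟩)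
          · exact a c
          · exact hxt c

theorem pvSumSplit (q : List Int) (g : Int → Nat) :
    2 * ((q.map fun k => g k / 2).sum) + (q.filter fun k => g k % 2 = 1).length
      = (q.map g).sum := by
  induction q with
  | nil => simp
  | cons a q ih =>
    by_cases h : g a % 2 = 1 <;> simp [h] <;> omega

theorem pvCountSum (ns : List Int) :
    ((PySem.Set.ofList ns).map fun k => ns.count k).sum = ns.length := by
  have hperm : (PySem.Set.ofList ns).Perm ns.dedup :=
    (List.perm_ext_iff_of_nodup (PySem.Set.nodup_ofList ns) ns.nodup_dedup).mpr
      (fun a => by rw [PySem.Set.mem_ofList, List.mem_dedup])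
  rw [(hperm.map fun k => ns.count k).sum_eq]
  exact List.sum_map_count_dedup_eq_length ns

theorem pvLenSplit (okey indicator : Int) (l : List Int) :
    (l.filterMap (pvNorm okey indicator)).length
      + l.countP (fun t => (pvNorm okey indicator t).isNone) = l.length := by
  induction l with
  | nil => simp
  | cons t rest ih =>
    rw [List.filterMap_cons, List.countP_cons]
    rcases hn : pvNorm okey indicator t with _ | v <;> simp <;> omega

theorem pvScalar (P s jok n : Nat) (h : 2 * P + s + jok = n) :
    (if ((s : Int)) > ((jok : Int)) then false
     else ((((P : Int) + s + PySem.Int.floordiv ((jok : Int) - s) 2) == 7) &&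
           ((((P : Int) + s + PySem.Int.floordiv ((jok : Int) - s) 2) * 2) == (n : Int))))
    = (decide (n = 14) && decide ((s : Int) ≤ ((jok : Int))) &&
       (PySem.Int.mod ((jok : Int) - s) 2 == 0)) := by
  by_cases hsj : s ≤ jok
  · have hc : ((jok : Int) - (s : Int)) = (((jok - s : Nat)) : Int) := by omega
    have hdiv : PySem.Int.floordiv (((jok - s : Nat)) : Int) 2 = ((((jok - s) / 2 : Nat)) : Int) := by
      exact_mod_cast PySem.Int.floordiv_natCast (jok - s) 2
    have hmod : PySem.Int.mod (((jok - s : Nat)) : Int) 2 = ((((jok - s) % 2 : Nat)) : Int) := by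
      exact_mod_cast PySem.Int.mod_natCast (jok - s) 2
    rw [hc, hdiv, hmod, if_neg (by omega), Bool.eq_iff_iff]
    simp only [Bool.and_eq_true, beq_iff_eq, decide_eq_true_eq]
    omega
  · have hd : decide ((s : Int) ≤ ((jok : Int))) = false :=
      decide_eq_false (by omega)
    rw [if_pos (by omega), hd, Bool.and_false, Bool.false_and]

theorem pvPairLoop (q : List Int) (p : Int) (ss : List Int) :
    q.foldl (fun (ps : Int × List Int) c =>
      (ps.1 + PySem.Int.floordiv c 2, if PySem.Int.mod c 2 ≠ 0 then ps.2 ++ [1] else ps.2)) (p, ss)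
    = (p + (q.map fun c => PySem.Int.floordiv c 2).sum,
       ss ++ ((q.filter fun c => decide (PySem.Int.mod c 2 ≠ 0)).map fun _ => (1 : Int))) := by
  induction q generalizing p ss with
  | nil => simp
  | cons c q ih =>
    rw [List.foldl_cons, List.filter_cons]
    by_cases hc : PySem.Int.mod c 2 ≠ 0
    · rw [if_pos hc, if_pos (by simpa using hc), ih]
      rw [List.map_cons, List.sum_cons, List.map_cons]
      simp only [Prod.mk.injEq, List.append_assoc, List.singleton_append]
      exact ⟨by ring, trivial⟩
    · rw [if_neg hc, if_neg (by simpa using hc), ih]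
      rw [List.map_cons, List.sum_cons]
      simp only [Prod.mk.injEq]
      exact ⟨by ring, trivial⟩

theorem pvMain (hand : List Int) (okey indicator : Int) :
    is_double_run_py hand okey indicator = is_double_run_py_alt hand okey indicator := by
  unfold is_double_run_py is_double_run_py_alt
  rw [pvFoldA, pvFoldB]
  simp only [zero_add]
  set ns := hand.filterMap (pvNorm okey indicator) with hns
  set jokN := hand.countP (fun t => (pvNorm okey indicator t).isNone) with hjokN
  set K := PySem.Set.ofList ns with hK
  -- A's dict is a counter over ns
  rw [← PySem.Dict.counter_eq_foldl]
  have hvals : (PySem.Dict.counter ns).values = K.map (fun k => ((ns.count k : Nat) : Int)) := by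
    show ((PySem.Dict.counter ns).items).map (·.2) = _
    rw [PySem.Dict.items_counter, List.map_map]
    rfl
  rw [hvals, pvPairLoop]
  simp only [zero_add, List.nil_append]
  -- rewrite the floordiv-sum and the odd filter to Nat level
  have hdivmap : ((K.map fun k => ((ns.count k : Nat) : Int)).map fun c => PySem.Int.floordiv c 2)
      = (K.map fun k => ns.count k / 2).map (Nat.cast : Nat → Int) := by
    rw [List.map_map, List.map_map]
    refine List.map_congr_left (fun k _ => ?_)
    exact_mod_cast PySem.Int.floordiv_natCast (ns.count k) 2
  have hfilt : ((K.map fun k => ((ns.count k : Nat) : Int)).filter fun c => decide (PySem.Int.mod c 2 ≠ 0))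
      = (K.filter fun k => ns.count k % 2 = 1).map (fun k => ((ns.count k : Nat) : Int)) := by
    rw [List.filter_map]
    congr 1
    refine List.filter_congr (fun k _ => ?_)
    have hm : PySem.Int.mod ((ns.count k : Nat) : Int) 2 = (((ns.count k % 2 : Nat)) : Int) := by
      exact_mod_cast PySem.Int.mod_natCast (ns.count k) 2
    simp only [Function.comp_apply, hm]
    rcases Nat.mod_two_eq_zero_or_one (ns.count k) with h | h <;> simp [h]
  rw [hdivmap, hfilt]
  set P := (K.map fun k => ns.count k / 2).sum with hP
  set sN := (K.filter fun k => ns.count k % 2 = 1).length with hsN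
  have hsump : ((K.map fun k => ns.count k / 2).map (Nat.cast : Nat → Int)).sum = (P : Int) := by
    rw [hP]; exact (Nat.cast_list_sum _).symm
  rw [hsump]
  have hslen : (((K.filter fun k => ns.count k % 2 = 1).map fun k => ((ns.count k : Nat) : Int)).map
      fun _ => (1 : Int)).length = sN := by
    simp [hsN]
  rw [hslen]
  -- B's parity set has exactly sN elements
  have hTF := pvToggleFold ns PySem.Set.empty (by simp [PySem.Set.empty])
  have hSlen : (ns.foldl pvToggle PySem.Set.empty).length = sN := by
    refine List.Perm.length_eq ?_
    refine (List.perm_ext_iff_of_nodup hTF.1 ((PySem.Set.nodup_ofList ns).filter _)).mpr (fun x => ?_)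
    rw [(hTF.2 x)]
    simp only [List.mem_filter, PySem.Set.mem_ofList, decide_eq_true_eq, PySem.Set.empty]
    constructor
    · rintro (⟨h1, _⟩ | ⟨_, h2⟩)
      · exact absurd h1 (List.not_mem_nil)
      · exact ⟨List.count_pos_iff.mp (by omega), h2⟩
    · rintro ⟨h1, h2⟩
      exact Or.inr ⟨List.not_mem_nil, h2⟩
  rw [hSlen]
  -- the counting identity: 2*P + sN + jokN = |hand|
  have hsum : 2 * P + sN + jokN = hand.length := by
    have h1 := pvSumSplit K (fun k => ns.count k)
    have h2 := pvCountSum ns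
    have h3 := pvLenSplit okey indicator hand
    rw [hP, hsN]
    rw [← hns] at h3
    rw [← hK] at h2
    omega
  exact pvScalar P sN jokN hand.length hsum

-- ===== VERDICT (by name: the statement is the Claim_ definition above) =====
theorem is_double_run_py_spec : Claim_equal_is_double_run_py := by
  intro hand okey indicator _
  unfold Spec_is_double_run_py
  exact pvMain hand okey indicator
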